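-- pv_equiv track=rewrite | github.com/rm2631/Price.Finder | mtg_deal_finder/stores/facetoface.py | _is_non_english
-- ===== SOURCE A (Python) =====
-- def _is_non_english(title: str) -> bool:
--     """
--     Check if a card title indicates a non-English version.
--
--     Args:
--         title: The card title to check
--
--     Returns:
--         True if the card is non-English, False otherwise
--     """
--     # Look for language markers in parentheses
--     language_markers = [
--         'french', 'japanese', 'german', 'spanish', 'italian',
--         'portuguese', 'russian', 'korean', 'chinese', 'simplified chinese',
--         'traditional chinese'
--     ]
--
--     title_lower = title.lower()
--     for marker in language_markers:
--         if f'({marker})' in title_lower or f'[{marker}]' in title_lower: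
--             return True
--
--     return False
-- ===== SOURCE B (Python) =====
-- _MARKERS = frozenset([
--     'french', 'japanese', 'german', 'spanish', 'italian',
--     'portuguese', 'russian', 'korean', 'chinese', 'simplified chinese',
--     'traditional chinese'
-- ])
--
--
-- def _is_non_english(title: str) -> bool:
--     """Single left-to-right scan: at each opening bracket, take the text up to
--     the matching close bracket and test it against the marker set."""
--     t = title.lower()
--     for i, ch in enumerate(t):
--         if ch == '(':
--             content, sep, _ = t[i + 1:].partition(')')
--             if sep and content in _MARKERS:
--                 return True
--         elif ch == '[':
--             content, sep, _ = t[i + 1:].partition(']')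
--             if sep and content in _MARKERS:
--                 return True
--     return False
-- ===== Notes on version B (the rewrite author's own statement) =====
-- stated objective: alternative
-- what changed: Instead of scanning the whole title once per marker for the parenthesised and the bracketed form of that marker, B makes a single left-to-right pass that, at each opening parenthesis or square bracket, extracts the text up to the next matching close bracket and tests it for membership in a frozenset of markers.
import Mathlib
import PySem

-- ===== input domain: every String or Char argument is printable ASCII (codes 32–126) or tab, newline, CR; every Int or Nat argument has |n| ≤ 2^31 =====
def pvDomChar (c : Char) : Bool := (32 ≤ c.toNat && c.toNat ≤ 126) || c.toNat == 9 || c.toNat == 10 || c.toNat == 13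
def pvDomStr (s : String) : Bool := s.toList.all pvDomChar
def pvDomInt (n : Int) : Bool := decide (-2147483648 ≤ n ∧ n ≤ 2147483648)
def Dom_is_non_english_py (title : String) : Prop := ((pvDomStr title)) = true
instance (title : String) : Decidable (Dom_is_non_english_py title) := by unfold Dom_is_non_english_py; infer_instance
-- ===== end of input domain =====

-- B replaces A's per-marker substring scans with one left-to-right pass that, at each
-- opening bracket, tests the text up to the matching close bracket against a marker set
-- (objective: alternative algorithm of similar cost).

-- the language-marker list both Pythons carry
def pvMarkers : List (List Char) :=
  (["french", "japanese", "german", "spanish", "italian",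
    "portuguese", "russian", "korean", "chinese", "simplified chinese",
    "traditional chinese"] : List String).map String.toList

-- ===== PORT A =====
-- loop 'for marker in language_markers: if f'({marker})' in title_lower or f'[{marker}]' in title_lower: return True'
def is_non_english_py (title : String) : Bool :=
  let title_lower := PySem.Chars.lower title.toList
  pvMarkers.any fun marker =>
    PySem.Chars.isIn ('(' :: marker ++ [')']) title_lower ||
    PySem.Chars.isIn ('[' :: marker ++ [']']) title_lower

-- ===== PORT B =====
-- frozenset of the markers (all distinct)
def pvMarkerSet : PySem.Set (List Char) := PySem.Set.ofList pvMarkers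

-- Source B's scan: 'for i, ch in enumerate(t)' with 't[i+1:].partition(close)' becomes the
-- structural recursion over the current suffix; str.partition(close) is ported by hand as
-- (takeWhile (≠ close), found-flag) — exact: partition's sep is nonempty iff close occurs.
def pvBScan (t : List Char) : Bool :=
  match t with
  | [] => false
  | ch :: rest =>
    if ch = '(' then
      if rest.contains ')' && PySem.Set.contains pvMarkerSet (rest.takeWhile (fun x => x ≠ ')')) then
        true
      else pvBScan rest
    else if ch = '[' then
      if rest.contains ']' && PySem.Set.contains pvMarkerSet (rest.takeWhile (fun x => x ≠ ']')) then
        true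
      else pvBScan rest
    else pvBScan rest

def is_non_english_py_alt (title : String) : Bool :=
  pvBScan (PySem.Chars.lower title.toList)

-- ===== PRECONDITION & SPEC =====
def Spec_is_non_english_py (title : String) (out : Bool) : Prop := out = is_non_english_py_alt title
instance (title : String) (out : Bool) : Decidable (Spec_is_non_english_py title out) := by unfold Spec_is_non_english_py; infer_instance

-- ===== CLAIM (what is proved, stated in full; the proofs are below) =====
def Claim_equal_is_non_english_py : Prop := ∀ (title : String), Dom_is_non_english_py title → Spec_is_non_english_py title (is_non_english_py title)

-- ===== LEMMAS AND PROOFS =====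

-- 'the title carries a marker': some marker occurs bracketed as an infix
def pvHasMarker (t : List Char) : Prop :=
  ∃ m ∈ pvMarkers, ('(' :: m ++ [')']) <:+: t ∨ ('[' :: m ++ [']']) <:+: t

-- A's core computes pvHasMarker
theorem pvA_iff (t : List Char) :
    (pvMarkers.any fun marker =>
      PySem.Chars.isIn ('(' :: marker ++ [')']) t ||
      PySem.Chars.isIn ('[' :: marker ++ [']']) t) = true ↔ pvHasMarker t := by
  simp [pvHasMarker, PySem.Chars.isIn_iff_infix]

-- the bracket-extraction step: 'm ++ [br] is a prefix of rest' ↔ 'br occurs in rest and the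
-- text before its first occurrence is exactly m' — for m not containing br
theorem pvPrefix_close_iff (rest m : List Char) (br : Char) (hm : br ∉ m) :
    m ++ [br] <+: rest ↔ br ∈ rest ∧ rest.takeWhile (fun x => x ≠ br) = m := by
  constructor
  · rintro ⟨tail, htail⟩
    have hr : rest = m ++ br :: tail := by rw [← htail]; simp
    subst hr
    refine ⟨by simp, ?_⟩
    rw [List.takeWhile_append_of_pos
      (fun a ha => by simp only [ne_eq, decide_eq_true_eq]; rintro rfl; exact hm ha)]
    simp
  · rintro ⟨hmem, htw⟩
    have hsplit := List.takeWhile_append_dropWhile (p := fun x => x ≠ br) (l := rest)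
    have hne : rest.dropWhile (fun x => x ≠ br) ≠ [] := by
      intro h0
      rw [h0, List.append_nil] at hsplit
      have hin : br ∈ rest.takeWhile (fun x => x ≠ br) := by rw [hsplit]; exact hmem
      have := List.mem_takeWhile_imp hin
      simp at this
    obtain ⟨d, ds, hds⟩ := List.exists_cons_of_ne_nil hne
    have hd : d = br := by
      have h := List.head_dropWhile_not (fun x => decide (x ≠ br)) hne
      have h3 : some ((rest.dropWhile (fun x => decide (x ≠ br))).head hne) = some d := by
        rw [← List.head?_eq_some_head, hds]; rfl
      rw [Option.some_inj] at h3
      rw [h3] at h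
      simpa using h
    refine ⟨ds, ?_⟩
    rw [← hsplit, htw, hds, hd]
    simp

-- no marker contains a close bracket (concrete check on the literal list)
theorem pvMarkers_no_close : ∀ m ∈ pvMarkers, ')' ∉ m ∧ ']' ∉ m := by decide

-- membership in B's frozenset is membership in the marker list
theorem pvMarkerSet_contains_iff (m : List Char) :
    PySem.Set.contains pvMarkerSet m = true ↔ m ∈ pvMarkers := by
  rw [PySem.Set.contains_iff, pvMarkerSet,
    PySem.Set.ofList_eq_self_of_nodup pvMarkers (by decide)]

-- B's scan computes pvHasMarker
theorem pvB_iff (t : List Char) : pvBScan t = true ↔ pvHasMarker t := by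
  induction t with
  | nil =>
    simp only [pvBScan]
    constructor
    · intro h; exact absurd h (by decide)
    · rintro ⟨m, hm, h | h⟩ <;> simp_all
  | cons ch rest ih =>
    have hstep : pvHasMarker (ch :: rest) ↔
        (∃ m ∈ pvMarkers, ('(' :: m ++ [')']) <+: ch :: rest ∨ ('[' :: m ++ [']']) <+: ch :: rest)
        ∨ pvHasMarker rest := by
      simp only [pvHasMarker, List.infix_cons_iff]
      constructor
      · rintro ⟨m, hm, (h | h) | (h | h)⟩
        · exact Or.inl ⟨m, hm, Or.inl h⟩
        · exact Or.inr ⟨m, hm, Or.inl h⟩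
        · exact Or.inl ⟨m, hm, Or.inr h⟩
        · exact Or.inr ⟨m, hm, Or.inr h⟩
      · rintro (⟨m, hm, h | h⟩ | ⟨m, hm, h | h⟩)
        · exact ⟨m, hm, Or.inl (Or.inl h)⟩
        · exact ⟨m, hm, Or.inr (Or.inl h)⟩
        · exact ⟨m, hm, Or.inl (Or.inr h)⟩
        · exact ⟨m, hm, Or.inr (Or.inr h)⟩
    have hpref : ∀ br close : Char, (∀ m ∈ pvMarkers, close ∉ m) →
        ((∃ m ∈ pvMarkers, (br :: m ++ [close]) <+: ch :: rest) ↔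
         (ch = br ∧ close ∈ rest ∧ rest.takeWhile (fun x => x ≠ close) ∈ pvMarkers)) := by
      intro br close hcl
      constructor
      · rintro ⟨m, hm, hp⟩
        rw [show (br :: m ++ [close]) = br :: (m ++ [close]) by simp,
          List.cons_prefix_cons] at hp
        obtain ⟨hbr, hp⟩ := hp
        rw [pvPrefix_close_iff rest m close (hcl m hm)] at hp
        exact ⟨hbr.symm, hp.1, hp.2 ▸ hm⟩
      · rintro ⟨hbr, hmem, hmk⟩
        refine ⟨rest.takeWhile (fun x => x ≠ close), hmk, ?_⟩
        rw [show (br :: rest.takeWhile (fun x => x ≠ close) ++ [close])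
            = br :: (rest.takeWhile (fun x => x ≠ close) ++ [close]) by simp,
          List.cons_prefix_cons]
        refine ⟨hbr.symm, ?_⟩
        rw [pvPrefix_close_iff rest _ close
          (fun h => by simpa using List.mem_takeWhile_imp h)]
        exact ⟨hmem, rfl⟩
    rw [hstep]
    have hparen := hpref '(' ')' (fun m hm => (pvMarkers_no_close m hm).1)
    have hbrack := hpref '[' ']' (fun m hm => (pvMarkers_no_close m hm).2)
    by_cases h1 : ch = '('
    · subst h1
      have hun : pvBScan ('(' :: rest) =
          if rest.contains ')' && PySem.Set.contains pvMarkerSet (rest.takeWhile (fun x => x ≠ ')')) then true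
          else pvBScan rest := rfl
      rw [hun]
      by_cases hc : rest.contains ')' && PySem.Set.contains pvMarkerSet (rest.takeWhile (fun x => x ≠ ')'))
      · rw [if_pos hc]
        simp only [Bool.and_eq_true, List.contains_eq_mem, decide_eq_true_eq,
          pvMarkerSet_contains_iff] at hc
        constructor
        · intro _
          obtain ⟨m, hm, hp⟩ := hparen.mpr ⟨rfl, hc.1, hc.2⟩
          exact Or.inl ⟨m, hm, Or.inl hp⟩
        · intro _; rfl
      · rw [if_neg hc, ih]
        constructor
        · exact Or.inr
        · rintro (hL | hR)
          · rcases hL with ⟨m, hm, hp | hp⟩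
            · exfalso
              obtain ⟨-, hmem, hmk⟩ := hparen.mp ⟨m, hm, hp⟩
              exact hc (by simp only [Bool.and_eq_true, List.contains_eq_mem,
                decide_eq_true_eq, pvMarkerSet_contains_iff]; exact ⟨hmem, hmk⟩)
            · rw [List.cons_append, List.cons_prefix_cons] at hp
              exact absurd hp.1.symm (by decide)
          · exact hR
    · by_cases h2 : ch = '['
      · subst h2
        have hun : pvBScan ('[' :: rest) =
            if rest.contains ']' && PySem.Set.contains pvMarkerSet (rest.takeWhile (fun x => x ≠ ']')) then true
            else pvBScan rest := rfl
        rw [hun]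
        by_cases hc : rest.contains ']' && PySem.Set.contains pvMarkerSet (rest.takeWhile (fun x => x ≠ ']'))
        · rw [if_pos hc]
          simp only [Bool.and_eq_true, List.contains_eq_mem, decide_eq_true_eq,
            pvMarkerSet_contains_iff] at hc
          constructor
          · intro _
            obtain ⟨m, hm, hp⟩ := hbrack.mpr ⟨rfl, hc.1, hc.2⟩
            exact Or.inl ⟨m, hm, Or.inr hp⟩
          · intro _; rfl
        · rw [if_neg hc, ih]
          constructor
          · exact Or.inr
          · rintro (hL | hR)
            · rcases hL with ⟨m, hm, hp | hp⟩
              · rw [List.cons_append, List.cons_prefix_cons] at hp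
                exact absurd hp.1.symm (by decide)
              · exfalso
                obtain ⟨-, hmem, hmk⟩ := hbrack.mp ⟨m, hm, hp⟩
                exact hc (by simp only [Bool.and_eq_true, List.contains_eq_mem,
                  decide_eq_true_eq, pvMarkerSet_contains_iff]; exact ⟨hmem, hmk⟩)
            · exact hR
      · simp only [pvBScan, if_neg h1, if_neg h2, ih]
        constructor
        · exact Or.inr
        · rintro (⟨m, hm, hp | hp⟩ | hR)
          · rw [List.cons_append, List.cons_prefix_cons] at hp; exact absurd hp.1.symm h1
          · rw [List.cons_append, List.cons_prefix_cons] at hp; exact absurd hp.1.symm h2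
          · exact hR

-- ===== VERDICT (by name: the statement is the Claim_ definition above) =====
theorem is_non_english_py_spec : Claim_equal_is_non_english_py := by
  intro title _
  unfold Spec_is_non_english_py
  unfold is_non_english_py is_non_english_py_alt
  have hA := pvA_iff (PySem.Chars.lower title.toList)
  have hB := pvB_iff (PySem.Chars.lower title.toList)
  rw [Bool.eq_iff_iff, hA, ← hB]
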